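-- pv_equiv track=rewrite | github.com/tomdu3/AOC | 2025/day05/day05part1.py | count_fresh_items
-- ===== SOURCE A (Python) =====
-- def count_fresh_items(ranges, items):
--     fresh_count = 0
--     for item in items:
--         for range in ranges:
--             if item >= range[0] and item <= range[1]:
--                 fresh_count += 1
--                 break
--     return fresh_count
-- ===== SOURCE B (Python) =====
-- def count_fresh_items(ranges, items):
--     # merge ranges (sorted by start) into disjoint intervals, then binary-search each item
--     merged = []
--     for r in sorted(ranges, key=lambda r: r[0]):
--         if merged and r[0] <= merged[-1][1]:
--             if r[1] > merged[-1][1]: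
--                 merged[-1] = (merged[-1][0], r[1])
--         else:
--             merged.append((r[0], r[1]))
--     starts = [p[0] for p in merged]
--     ends = [p[1] for p in merged]
--     n = len(merged)
--     count = 0
--     for item in items:
--         lo, hi = 0, n
--         while lo < hi:
--             mid = (lo + hi) // 2
--             if starts[mid] <= item:
--                 lo = mid + 1
--             else:
--                 hi = mid
--         if lo > 0 and item <= ends[lo - 1]:
--             count += 1
--     return count
-- ===== Notes on version B (the rewrite author's own statement) =====
-- stated objective: faster
-- what changed: Instead of scanning every range for every item, B sorts the ranges by start once, merges them into disjoint intervals, and binary-searches each item among the interval starts.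
import Mathlib
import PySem

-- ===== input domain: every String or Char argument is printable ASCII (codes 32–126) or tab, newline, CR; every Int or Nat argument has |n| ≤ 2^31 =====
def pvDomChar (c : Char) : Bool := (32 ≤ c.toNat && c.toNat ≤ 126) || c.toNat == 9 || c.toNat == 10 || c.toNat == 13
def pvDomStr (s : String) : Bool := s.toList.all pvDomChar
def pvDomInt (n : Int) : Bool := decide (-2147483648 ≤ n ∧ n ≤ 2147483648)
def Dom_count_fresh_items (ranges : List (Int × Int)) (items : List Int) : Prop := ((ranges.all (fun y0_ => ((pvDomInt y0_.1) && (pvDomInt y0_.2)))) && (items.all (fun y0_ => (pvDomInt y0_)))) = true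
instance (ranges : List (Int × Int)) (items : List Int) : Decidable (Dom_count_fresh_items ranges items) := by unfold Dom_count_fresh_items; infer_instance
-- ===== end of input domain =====

-- B merges the ranges (sorted by start) into disjoint intervals once and binary-searches
-- each item, replacing A's per-item scan of all ranges (objective: faster, asymptotic).

-- ===== PORT A =====
-- inner 'for range in ranges: … break' loop of A
def pvAScan (ranges : List (Int × Int)) (item : Int) (fc : Int) : Int :=
  match ranges with
  | [] => fc
  | r :: rs => if item ≥ r.1 ∧ item ≤ r.2 then fc + 1 else pvAScan rs item fc

def count_fresh_items (ranges : List (Int × Int)) (items : List Int) : Int :=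
  items.foldl (fun fc item => pvAScan ranges item fc) 0

-- ===== PORT B =====
-- one step of B's merge loop; the accumulator is kept head-first (head = Python's
-- merged[-1], so appending / overwriting merged[-1] is a head operation) and reversed below
def pvMStep (acc : List (Int × Int)) (r : Int × Int) : List (Int × Int) :=
  match acc with
  | [] => [(r.1, r.2)]
  | last :: rest =>
    if r.1 ≤ last.2 then
      if r.2 > last.2 then (last.1, r.2) :: rest else last :: rest
    else (r.1, r.2) :: last :: rest

-- B's hand-written 'while lo < hi' binary search; starts[mid] is in range at every call
-- made by count_fresh_items_alt, so getD is exact there. The fuel argument is only a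
-- totality guard: hi - lo shrinks at every iteration, so fuel = hi - lo never runs out.
def pvBSearchF (starts : List Int) (item : Int) (fuel lo hi : Nat) : Nat :=
  match fuel with
  | 0 => lo
  | fuel + 1 =>
    if lo < hi then
      let mid := (lo + hi) / 2
      if starts.getD mid 0 ≤ item then pvBSearchF starts item fuel (mid + 1) hi
      else pvBSearchF starts item fuel lo mid
    else lo

def pvBSearch (starts : List Int) (item : Int) (lo hi : Nat) : Nat :=
  pvBSearchF starts item (hi - lo) lo hi

def count_fresh_items_alt (ranges : List (Int × Int)) (items : List Int) : Int :=
  let merged := ((PySem.List.sorted ranges (fun r => r.1)).foldl pvMStep []).reverse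
  let starts := merged.map (fun p => p.1)
  let ends := merged.map (fun p => p.2)
  let n := merged.length
  items.foldl (fun count item =>
    let lo := pvBSearch starts item 0 n
    if 0 < lo ∧ item ≤ ends.getD (lo - 1) 0 then count + 1 else count) 0

-- ===== PRECONDITION & SPEC =====
def Spec_count_fresh_items (ranges : List (Int × Int)) (items : List Int) (out : Int) : Prop := out = count_fresh_items_alt ranges items
instance (ranges : List (Int × Int)) (items : List Int) (out : Int) : Decidable (Spec_count_fresh_items ranges items out) := by unfold Spec_count_fresh_items; infer_instance

-- ===== CLAIM (what is proved, stated in full; the proofs are below) =====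
def Claim_equal_count_fresh_items : Prop := ∀ (ranges : List (Int × Int)) (items : List Int), Dom_count_fresh_items ranges items → Spec_count_fresh_items ranges items (count_fresh_items ranges items)

-- ===== LEMMAS AND PROOFS =====

-- forward order of the merged list: starts nondecreasing and a gap before each next interval
def pvRel (a b : Int × Int) : Prop := a.1 ≤ b.1 ∧ a.2 < b.1
-- the same relation on the head-first (reversed) accumulator
def pvRevRel (a b : Int × Int) : Prop := b.1 ≤ a.1 ∧ b.2 < a.1

lemma pvAScan_eq (rs : List (Int × Int)) (item fc : Int) :
    pvAScan rs item fc = if ∃ r ∈ rs, r.1 ≤ item ∧ item ≤ r.2 then fc + 1 else fc := by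
  induction rs with
  | nil => simp [pvAScan]
  | cons r rs ih =>
    by_cases h : item ≥ r.1 ∧ item ≤ r.2
    · rw [show pvAScan (r :: rs) item fc = fc + 1 from by simp [pvAScan, h],
        if_pos ⟨r, by simp, h.1, h.2⟩]
    · rw [show pvAScan (r :: rs) item fc = pvAScan rs item fc from by simp [pvAScan, h], ih]
      apply if_congr _ rfl rfl
      constructor
      · rintro ⟨p, hp1, hp2⟩; exact ⟨p, List.mem_cons_of_mem r hp1, hp2⟩
      · rintro ⟨p, hp1, hp2⟩
        rcases List.mem_cons.mp hp1 with hh | hh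
        · exact absurd (hh ▸ hp2) (by tauto)
        · exact ⟨p, hh, hp2⟩

lemma pvMerge_spec (l : List (Int × Int)) :
    ∀ acc : List (Int × Int),
    List.Pairwise (fun a b => a.1 ≤ b.1) l →
    List.IsChain pvRevRel acc →
    (∀ a ∈ acc, ∀ b ∈ l, a.1 ≤ b.1) →
    List.IsChain pvRevRel (l.foldl pvMStep acc) ∧
    (∀ x, (∃ r ∈ l.foldl pvMStep acc, r.1 ≤ x ∧ x ≤ r.2) ↔
          (∃ r ∈ acc, r.1 ≤ x ∧ x ≤ r.2) ∨ (∃ r ∈ l, r.1 ≤ x ∧ x ≤ r.2)) := by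
  induction l with
  | nil => intro acc _ hc _; simpa using hc
  | cons r rs ih =>
    intro acc hp hc hb
    have hp' : List.Pairwise (fun a b => a.1 ≤ b.1) rs := hp.tail
    have hrle : ∀ b ∈ rs, r.1 ≤ b.1 := fun b hbm => (List.pairwise_cons.mp hp).1 b hbm
    have hfold : (r :: rs).foldl pvMStep acc = rs.foldl pvMStep (pvMStep acc r) := rfl
    have key : List.IsChain pvRevRel (pvMStep acc r) ∧
        (∀ a ∈ pvMStep acc r, ∀ b ∈ rs, a.1 ≤ b.1) ∧
        (∀ x, (∃ p ∈ pvMStep acc r, p.1 ≤ x ∧ x ≤ p.2) ↔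
              (∃ p ∈ acc, p.1 ≤ x ∧ x ≤ p.2) ∨ (r.1 ≤ x ∧ x ≤ r.2)) := by
      rcases acc with _ | ⟨last, rest⟩
      · refine ⟨by simp [pvMStep], ?_, ?_⟩
        · intro a ha b hbm; simp only [pvMStep, List.mem_singleton] at ha
          rw [ha]; exact hrle b hbm
        · intro x; simp [pvMStep]
      · have hlr : last.1 ≤ r.1 := hb last (by simp) r (by simp)
        by_cases h1 : r.1 ≤ last.2
        · by_cases h2 : r.2 > last.2
          · -- extend merged[-1] to (last.1, r.2)
            have hstep : pvMStep (last :: rest) r = (last.1, r.2) :: rest := by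
              simp [pvMStep, h1, h2]
            rw [hstep]
            refine ⟨?_, ?_, ?_⟩
            · rcases rest with _ | ⟨b, rest'⟩
              · simp
              · rw [List.isChain_cons_cons]
                rcases List.isChain_cons_cons.mp hc with ⟨hr, htl⟩
                exact ⟨hr, htl⟩
            · intro a ha b hbm
              rcases List.mem_cons.mp ha with h | h
              · rw [h]; exact hb last (by simp) b (by simp [hbm])
              · exact hb a (by simp [h]) b (by simp [hbm])
            · intro x
              constructor
              · rintro ⟨p, hp1, hp2⟩
                rcases List.mem_cons.mp hp1 with h | h
                · rw [h] at hp2; simp only at hp2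
                  by_cases hx : x ≤ last.2
                  · exact Or.inl ⟨last, by simp, hp2.1, hx⟩
                  · exact Or.inr ⟨by omega, hp2.2⟩
                · exact Or.inl ⟨p, by simp [h], hp2⟩
              · rintro (⟨p, hp1, hp2⟩ | hcv)
                · rcases List.mem_cons.mp hp1 with h | h
                  · rw [h] at hp2
                    exact ⟨(last.1, r.2), by simp, by simp; omega⟩
                  · exact ⟨p, by simp [h], hp2⟩
                · exact ⟨(last.1, r.2), by simp, by simp; omega⟩
          · -- r is contained in merged[-1]: accumulator unchanged
            have hstep : pvMStep (last :: rest) r = last :: rest := by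
              simp [pvMStep, h1, h2]
            rw [hstep]
            refine ⟨hc, fun a ha b hbm => hb a ha b (by simp [hbm]), ?_⟩
            intro x
            constructor
            · exact fun h => Or.inl h
            · rintro (h | hcv)
              · exact h
              · exact ⟨last, by simp, by omega, by omega⟩
        · -- gap: append a fresh interval
          have hstep : pvMStep (last :: rest) r = (r.1, r.2) :: last :: rest := by
            simp [pvMStep, h1]
          rw [hstep]
          refine ⟨?_, ?_, ?_⟩
          · rw [List.isChain_cons_cons]
            exact ⟨⟨hlr, by omega⟩, hc⟩
          · intro a ha b hbm
            rcases List.mem_cons.mp ha with h | h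
            · rw [h]; exact hrle b hbm
            · exact hb a h b (by simp [hbm])
          · intro x
            constructor
            · rintro ⟨p, hp1, hp2⟩
              rcases List.mem_cons.mp hp1 with h | h
              · rw [h] at hp2; exact Or.inr ⟨hp2.1, hp2.2⟩
              · exact Or.inl ⟨p, h, hp2⟩
            · rintro (⟨p, hp1, hp2⟩ | hcv)
              · exact ⟨p, by simp [hp1], hp2⟩
              · exact ⟨(r.1, r.2), by simp, hcv.1, hcv.2⟩
    have hres := ih (pvMStep acc r) hp' key.1 key.2.1
    rw [hfold]
    refine ⟨hres.1, ?_⟩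
    intro x
    rw [hres.2 x, key.2.2 x]
    constructor
    · rintro ((h | h) | h)
      · exact Or.inl h
      · exact Or.inr ⟨r, by simp, h⟩
      · rcases h with ⟨p, hp1, hp2⟩; exact Or.inr ⟨p, by simp [hp1], hp2⟩
    · rintro (h | ⟨p, hp1, hp2⟩)
      · exact Or.inl (Or.inl h)
      · rcases List.mem_cons.mp hp1 with h | h
        · exact Or.inl (Or.inr (h ▸ hp2))
        · exact Or.inr ⟨p, h, hp2⟩

-- Chain of pvRel gives the pairwise form (pvRel is transitive through starts)
lemma pvChain_pairwise : ∀ l : List (Int × Int), List.IsChain pvRel l → List.Pairwise pvRel l := by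
  intro l hl
  induction l with
  | nil => simp
  | cons a t ih =>
    rcases t with _ | ⟨b, t'⟩
    · simp
    · rcases List.isChain_cons_cons.mp hl with ⟨hab, htl⟩
      have hp := ih htl
      rw [List.pairwise_cons]
      refine ⟨?_, hp⟩
      intro c hc
      rcases List.mem_cons.mp hc with h | h
      · exact h ▸ hab
      · have := (List.pairwise_cons.mp hp).1 c h
        exact ⟨le_trans hab.1 this.1, lt_of_lt_of_le hab.2 this.1⟩

-- monotone getD on a (·≤·)-pairwise list
lemma pvGetD_mono (l : List Int) (h : l.Pairwise (·≤·)) {i j : Nat} (hi : i ≤ j)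
    (hj : j < l.length) : l.getD i 0 ≤ l.getD j 0 := by
  rw [List.getD_eq_getElem _ _ (by omega), List.getD_eq_getElem _ _ hj]
  rcases Nat.eq_or_lt_of_le hi with h' | h'
  · subst h'; exact le_refl _
  · exact List.pairwise_iff_getElem.mp h i j (by omega) hj h'

-- unfolding equations of pvBSearchF
lemma pvBSearchF_stop (s : List Int) (x : Int) (fuel lo hi : Nat) (h : ¬ lo < hi) :
    pvBSearchF s x (fuel + 1) lo hi = lo := by
  show (if lo < hi then _ else lo) = lo
  rw [if_neg h]
lemma pvBSearchF_left (s : List Int) (x : Int) (fuel lo hi : Nat) (h : lo < hi)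
    (hle : s.getD ((lo+hi)/2) 0 ≤ x) :
    pvBSearchF s x (fuel + 1) lo hi = pvBSearchF s x fuel ((lo+hi)/2 + 1) hi := by
  show (if lo < hi then _ else lo) = _
  rw [if_pos h]; exact if_pos hle
lemma pvBSearchF_right (s : List Int) (x : Int) (fuel lo hi : Nat) (h : lo < hi)
    (hle : ¬ s.getD ((lo+hi)/2) 0 ≤ x) :
    pvBSearchF s x (fuel + 1) lo hi = pvBSearchF s x fuel lo ((lo+hi)/2) := by
  show (if lo < hi then _ else lo) = _
  rw [if_pos h]; exact if_neg hle

-- binary-search postcondition on a monotone list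
lemma pvBSearchF_spec (starts : List Int) (item : Int) (hm : starts.Pairwise (·≤·)) :
    ∀ fuel lo hi : Nat, hi - lo ≤ fuel → lo ≤ hi → hi ≤ starts.length →
    lo ≤ pvBSearchF starts item fuel lo hi ∧ pvBSearchF starts item fuel lo hi ≤ hi ∧
    (∀ j, lo ≤ j → j < pvBSearchF starts item fuel lo hi → starts.getD j 0 ≤ item) ∧
    (∀ j, pvBSearchF starts item fuel lo hi ≤ j → j < hi → item < starts.getD j 0) := by
  intro fuel
  induction fuel with
  | zero =>
    intro lo hi hd hlh hhl
    have h0 : pvBSearchF starts item 0 lo hi = lo := rfl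
    rw [h0]
    refine ⟨le_refl _, by omega, ?_, ?_⟩
    · intro j hj1 hj2; exact absurd hj2 (by omega)
    · intro j hj1 hj2; exact absurd hj2 (by omega)
  | succ fuel ih =>
    intro lo hi hd hlh hhl
    by_cases h : lo < hi
    · by_cases hle : starts.getD ((lo + hi) / 2) 0 ≤ item
      · rw [pvBSearchF_left starts item fuel lo hi h hle]
        have hrec := ih ((lo + hi) / 2 + 1) hi (by omega) (by omega) hhl
        refine ⟨by omega, hrec.2.1, ?_, hrec.2.2.2⟩
        intro j hj1 hj2
        by_cases hj : j ≤ (lo + hi) / 2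
        · exact le_trans (pvGetD_mono starts hm hj (by omega)) hle
        · exact hrec.2.2.1 j (by omega) hj2
      · rw [pvBSearchF_right starts item fuel lo hi h hle]
        have hrec := ih lo ((lo + hi) / 2) (by omega) (by omega) (by omega)
        refine ⟨hrec.1, by omega, hrec.2.2.1, ?_⟩
        intro j hj1 hj2
        by_cases hj : j < (lo + hi) / 2
        · exact hrec.2.2.2 j hj1 hj
        · exact lt_of_lt_of_le (by omega : item < starts.getD ((lo + hi) / 2) 0)
            (pvGetD_mono starts hm (by omega) (by omega))
    · rw [pvBSearchF_stop starts item fuel lo hi h]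
      refine ⟨le_refl _, by omega, ?_, ?_⟩
      · intro j hj1 hj2; exact absurd hj2 (by omega)
      · intro j hj1 hj2; exact absurd hj2 (by omega)

lemma pvBSearch_spec (starts : List Int) (item : Int) (hm : starts.Pairwise (·≤·))
    (lo hi : Nat) (hlh : lo ≤ hi) (hhl : hi ≤ starts.length) :
    lo ≤ pvBSearch starts item lo hi ∧ pvBSearch starts item lo hi ≤ hi ∧
    (∀ j, lo ≤ j → j < pvBSearch starts item lo hi → starts.getD j 0 ≤ item) ∧
    (∀ j, pvBSearch starts item lo hi ≤ j → j < hi → item < starts.getD j 0) :=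
  pvBSearchF_spec starts item hm (hi - lo) lo hi (le_refl _) hlh hhl

-- the per-item test of B is exactly "covered by some merged interval"
lemma pvTest_iff (merged : List (Int × Int)) (hpw : List.Pairwise pvRel merged) (x : Int) :
    (0 < pvBSearch (merged.map (fun p => p.1)) x 0 merged.length ∧
     x ≤ (merged.map (fun p => p.2)).getD (pvBSearch (merged.map (fun p => p.1)) x 0 merged.length - 1) 0)
    ↔ (∃ r ∈ merged, r.1 ≤ x ∧ x ≤ r.2) := by
  set starts := merged.map (fun p => p.1) with hs
  set i := pvBSearch starts x 0 merged.length with hi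
  have hlen : starts.length = merged.length := by simp [hs]
  have hmono : starts.Pairwise (·≤·) := by
    rw [hs, List.pairwise_map]
    exact hpw.imp (fun h => h.1)
  have hspec := pvBSearch_spec starts x hmono 0 merged.length (by omega) (by omega)
  obtain ⟨-, hile, hlo, hhi⟩ := hspec
  have hgs : ∀ k (hk : k < merged.length), starts.getD k 0 = merged[k].1 := by
    intro k hk
    rw [hs, List.getD_eq_getElem _ _ (by simpa using hk), List.getElem_map]
  have hge : ∀ k (hk : k < merged.length), (merged.map (fun p => p.2)).getD k 0 = merged[k].2 := by
    intro k hk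
    rw [List.getD_eq_getElem _ _ (by simpa using hk), List.getElem_map]
  constructor
  · rintro ⟨hpos, hend⟩
    have hi1 : i - 1 < merged.length := by omega
    refine ⟨merged[i-1], List.getElem_mem hi1, ?_, ?_⟩
    · have := hlo (i - 1) (by omega) (by omega)
      rwa [hgs (i-1) hi1] at this
    · rwa [hge (i-1) hi1] at hend
  · rintro ⟨r, hr, hr1, hr2⟩
    obtain ⟨k, hk, hkr⟩ := List.mem_iff_getElem.mp hr
    have hks : starts.getD k 0 ≤ x := by rw [hgs k hk, hkr]; exact hr1
    have hki : k < i := by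
      by_contra hkc
      exact absurd hks (not_le.mpr (hhi k (by omega) hk))
    have hpos : 0 < i := by omega
    refine ⟨hpos, ?_⟩
    have hi1 : i - 1 < merged.length := by omega
    rw [hge (i-1) hi1]
    by_cases hk1 : k = i - 1
    · subst hk1; rw [hkr]; exact hr2
    · -- k < i-1: the gap invariant forces a contradiction
      have hklt : k < i - 1 := by omega
      have hrel : pvRel merged[k] merged[i-1] :=
        List.pairwise_iff_getElem.mp hpw k (i-1) hk hi1 hklt
      have : merged[i-1].1 ≤ x := by
        have := hlo (i - 1) (by omega) (by omega)
        rwa [hgs (i-1) hi1] at this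
      rw [hkr] at hrel
      obtain ⟨hrel1, hrel2⟩ := hrel
      omega

theorem count_fresh_items_spec : Claim_equal_count_fresh_items := by
  intro ranges items _
  unfold Spec_count_fresh_items
  have hsp := PySem.List.sorted_pairwise ranges (fun r : Int × Int => r.1)
  have hms := pvMerge_spec (PySem.List.sorted ranges (fun r : Int × Int => r.1)) []
    hsp (by simp) (by simp)
  set merged := ((PySem.List.sorted ranges (fun r : Int × Int => r.1)).foldl pvMStep []).reverse
    with hm
  have hchain : List.IsChain pvRel merged := by
    rw [hm, List.isChain_reverse]; exact hms.1
  have hpw := pvChain_pairwise merged hchain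
  -- membership in the merged intervals is exactly membership in some original range
  have hcov : ∀ x, (∃ r ∈ merged, r.1 ≤ x ∧ x ≤ r.2) ↔ (∃ r ∈ ranges, r.1 ≤ x ∧ x ≤ r.2) := by
    intro x
    constructor
    · intro hcl
      have h' : ∃ r ∈ (PySem.List.sorted ranges (fun r : Int × Int => r.1)).foldl pvMStep [],
          r.1 ≤ x ∧ x ≤ r.2 := by
        rcases hcl with ⟨p, hp1, hp2⟩
        rw [hm] at hp1
        exact ⟨p, List.mem_reverse.mp hp1, hp2⟩
      rcases (hms.2 x).mp h' with h'' | ⟨p, hp1, hp2⟩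
      · simp at h''
      · exact ⟨p, (PySem.List.mem_sorted _ _ _ _).mp hp1, hp2⟩
    · rintro ⟨r, hr, h2⟩
      rcases (hms.2 x).mpr (Or.inr ⟨r, (PySem.List.mem_sorted _ _ _ _).mpr hr, h2⟩)
        with ⟨p, hp1, hp2⟩
      refine ⟨p, ?_, hp2⟩
      rw [hm]
      exact List.mem_reverse.mpr hp1
  have halt : count_fresh_items_alt ranges items =
      items.foldl (fun count item =>
        if 0 < pvBSearch (merged.map (fun p => p.1)) item 0 merged.length ∧
           item ≤ (merged.map (fun p => p.2)).getD
             (pvBSearch (merged.map (fun p => p.1)) item 0 merged.length - 1) 0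
        then count + 1 else count) 0 := rfl
  have ha : count_fresh_items ranges items =
      items.foldl (fun fc item => pvAScan ranges item fc) 0 := rfl
  have hfun : ∀ (c item : Int), pvAScan ranges item c =
      (if 0 < pvBSearch (merged.map (fun p => p.1)) item 0 merged.length ∧
           item ≤ (merged.map (fun p => p.2)).getD
             (pvBSearch (merged.map (fun p => p.1)) item 0 merged.length - 1) 0
       then c + 1 else c) := by
    intro c item
    rw [pvAScan_eq]
    exact if_congr (((pvTest_iff merged hpw item).trans (hcov item)).symm) rfl rfl
  rw [ha, halt]
  simp only [hfun]
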